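-- pv_equiv track=rewrite | github.com/rasuluzd/soccernet-search | src/cleaning/comprehensive_normalizer.py | _simple_phonetic
-- ===== SOURCE A (Python) =====
-- def _simple_phonetic(text: str) -> str:
--     """Simple phonetic encoding as fallback."""
--     # Remove vowels except at start, collapse double letters
--     if not text:
--         return ""
--     result = text[0]
--     prev = text[0]
--     for c in text[1:]:
--         if c not in 'aeiou' and c != prev:
--             result += c
--             prev = c
--     return result[:6]
-- ===== SOURCE B (Python) =====
-- def _simple_phonetic(text: str) -> str:
--     """Simple phonetic encoding as fallback (stateless positional version)."""
--     if not text: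
--         return ""
--     # Stage 1: vowel-stripped string (first char kept unconditionally).
--     filtered = text[0] + ''.join(c for c in text[1:] if c not in 'aeiou')
--     # Stage 2: keep each char that differs from its left neighbour in `filtered`
--     # — a stateless pairwise comparison, no carried 'prev' state.
--     out = filtered[0] + ''.join(b for a, b in zip(filtered, filtered[1:]) if b != a)
--     return out[:6]
-- ===== Notes on version B (the rewrite author's own statement) =====
-- stated objective: alternative
-- what changed: Replaces A's single fused loop with a carried last-emitted-char state by two staged stateless passes: build the vowel-stripped string, then select by a positional pairwise comparison of each character with its left neighbour via zip (no accumulator state), then truncate to 6.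
import Mathlib
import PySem

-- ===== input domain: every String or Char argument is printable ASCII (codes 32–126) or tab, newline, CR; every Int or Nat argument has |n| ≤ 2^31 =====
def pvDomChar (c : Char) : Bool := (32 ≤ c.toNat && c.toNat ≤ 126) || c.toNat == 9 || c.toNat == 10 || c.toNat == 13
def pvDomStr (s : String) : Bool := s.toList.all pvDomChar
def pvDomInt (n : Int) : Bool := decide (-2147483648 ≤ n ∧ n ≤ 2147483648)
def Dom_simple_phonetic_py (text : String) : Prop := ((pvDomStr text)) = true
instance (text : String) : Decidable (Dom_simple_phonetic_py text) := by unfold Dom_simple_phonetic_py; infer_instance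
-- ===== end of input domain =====

-- B replaces A's fused stateful loop (carried last-emitted char) by two staged stateless passes: a vowel filter, then a positional pairwise (zip-with-left-neighbour) selection; same cost, alternative decomposition.


-- ===== PORT A =====
-- c in 'aeiou'
def pvVowel (c : Char) : Bool := c == 'a' || c == 'e' || c == 'i' || c == 'o' || c == 'u'

-- A's loop body: append c when it is a non-vowel different from prev (state = (result, prev))
def pvStepA (st : List Char × Char) (c : Char) : List Char × Char :=
  if !pvVowel c && c != st.2 then (st.1 ++ [c], c) else st

-- literal port of A: result := text[0]; loop over text[1:]; return result[:6]
def simple_phonetic_py (text : String) : String :=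
  match text.toList with
  | [] => ""
  | h :: rest => String.mk ((rest.foldl pvStepA ([h], h)).1.take 6)

-- ===== PORT B =====
-- stage 2 of B: zip the filtered string with its own tail and keep each right
-- component that differs from its left neighbour (stateless pairwise selection)
def pvPairKeep (f : List Char) : List Char :=
  (f.zip f.tail).filterMap (fun ab => if ab.2 ≠ ab.1 then some ab.2 else none)

-- port of B: stage 1 builds the vowel-stripped list, stage 2 is pvPairKeep, then [:6]
def simple_phonetic_py_alt (text : String) : String :=
  match text.toList with
  | [] => ""
  | h :: rest =>
    String.mk ((h :: pvPairKeep (h :: rest.filter (fun c => !pvVowel c))).take 6)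

-- ===== PRECONDITION & SPEC =====
def Spec_simple_phonetic_py (text : String) (out : String) : Prop := out = simple_phonetic_py_alt text
instance (text : String) (out : String) : Decidable (Spec_simple_phonetic_py text out) := by unfold Spec_simple_phonetic_py; infer_instance

-- ===== CLAIM (what is proved, stated in full; the proofs are below) =====
def Claim_equal_simple_phonetic_py : Prop := ∀ (text : String), Dom_simple_phonetic_py text → Spec_simple_phonetic_py text (simple_phonetic_py text)

-- ===== LEMMAS AND PROOFS =====

-- proof-side bridge: run-collapse of a list given the previously emitted character
def pvCollapseFrom (prev : Char) : List Char → List Char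
  | [] => []
  | c :: rest => if c = prev then pvCollapseFrom prev rest else c :: pvCollapseFrom c rest

-- A's loop invariant: the fold appends exactly the run-collapse of the vowel-filtered suffix,
-- and the carried prev is the last emitted character.
theorem pv_loop_eq (l : List Char) : ∀ (res : List Char) (prev : Char),
    l.foldl pvStepA (res, prev)
    = (res ++ pvCollapseFrom prev (l.filter (fun c => !pvVowel c)),
       (pvCollapseFrom prev (l.filter (fun c => !pvVowel c))).getLastD prev) := by
  induction l with
  | nil => intro res prev; simp [pvCollapseFrom]
  | cons c rest ih =>
    intro res prev
    rw [List.foldl_cons]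
    by_cases hv : pvVowel c = true
    · have hs : pvStepA (res, prev) c = (res, prev) := by simp [pvStepA, hv]
      rw [hs, ih]
      simp [hv]
    · by_cases hc : c = prev
      · have hs : pvStepA (res, prev) c = (res, prev) := by simp [pvStepA, hc]
        subst hc
        have hv' : pvVowel c = false := by simpa using hv
        rw [hs, ih]
        simp [hv', pvCollapseFrom]
      · have hs : pvStepA (res, prev) c = (res ++ [c], c) := by simp [pvStepA, hv, hc]
        have hv' : pvVowel c = false := by simpa using hv
        have hfil : List.filter (fun c => !pvVowel c) (c :: rest)
            = c :: List.filter (fun c => !pvVowel c) rest := by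
          simp [hv']
        rw [hs, ih, hfil]
        have hcol : pvCollapseFrom prev (c :: List.filter (fun c => !pvVowel c) rest)
            = c :: pvCollapseFrom c (List.filter (fun c => !pvVowel c) rest) := by
          rw [pvCollapseFrom, if_neg hc]
        rw [hcol, List.getLastD_cons]
        simp

-- B's pairwise selection computes exactly the run-collapse with the head as seed
theorem pv_pairKeep_eq (f : List Char) : ∀ (prev : Char),
    pvPairKeep (prev :: f) = pvCollapseFrom prev f := by
  induction f with
  | nil => intro prev; simp [pvPairKeep, pvCollapseFrom]
  | cons c rest ih =>
    intro prev
    by_cases hc : c = prev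
    · subst hc
      simp [pvPairKeep, pvCollapseFrom, List.filterMap_cons] at *
      simpa [pvPairKeep] using ih c
    · simp [pvPairKeep, pvCollapseFrom, List.filterMap_cons, hc] at *
      simpa [pvPairKeep] using ih c

-- ===== VERDICT (by name: the statement is the Claim_ definition above) =====
theorem simple_phonetic_py_spec : Claim_equal_simple_phonetic_py := by
  intro text _
  unfold Spec_simple_phonetic_py simple_phonetic_py simple_phonetic_py_alt
  cases h : text.toList with
  | nil => rfl
  | cons hd rest =>
    show String.mk ((rest.foldl pvStepA ([hd], hd)).1.take 6)
        = String.mk ((hd :: pvPairKeep (hd :: rest.filter (fun c => !pvVowel c))).take 6)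
    rw [pv_loop_eq, pv_pairKeep_eq]
    rfl
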